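-- pv_equiv track=rewrite | github.com/patelramesh541/py_ui_search_keyword_in_folder | index.py | search_recursive
-- ===== SOURCE A (Python) =====
-- def search_recursive(words, content):
--     if (len(words)) > 0:
--         search_word = words.pop().strip().lower()
--         if  len(search_word)> 0 and search_word in content.lower():
--             if (len(words)) > 0:
--                 return search_recursive(words, content)
--             else:
--                 return True
--         else:
--             return False
--     else:
--         return False
-- ===== SOURCE B (Python) =====
-- def search_recursive(words, content):
--     # Return-value equivalent to A; B does not mutate `words` (A pops every checked word).
--     c = content.lower()
--     def ok(w):
--         w = w.strip().lower()
--         return len(w) > 0 and w in c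
--     return len(words) > 0 and all(ok(w) for w in words)
-- ===== Notes on version B (the rewrite author's own statement) =====
-- stated objective: simpler
-- what changed: A's destructive tail recursion popping from the end of words (re-lowering content at every call) is replaced by a single non-mutating all() pass with content lowered once; return-value equivalent, B does not mutate words.
import Mathlib
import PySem

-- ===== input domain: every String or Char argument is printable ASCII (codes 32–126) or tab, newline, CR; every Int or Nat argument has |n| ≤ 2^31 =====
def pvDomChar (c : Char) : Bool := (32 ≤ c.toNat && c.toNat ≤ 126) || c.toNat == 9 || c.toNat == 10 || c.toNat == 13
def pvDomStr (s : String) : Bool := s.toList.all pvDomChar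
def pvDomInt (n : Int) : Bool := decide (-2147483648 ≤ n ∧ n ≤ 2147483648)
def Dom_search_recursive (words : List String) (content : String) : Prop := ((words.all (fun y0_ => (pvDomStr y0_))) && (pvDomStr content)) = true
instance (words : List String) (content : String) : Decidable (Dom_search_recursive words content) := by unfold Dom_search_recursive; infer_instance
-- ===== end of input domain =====

-- B replaces A's destructive pop-from-the-end tail recursion by one non-mutating all() pass
-- (idiomatic; return-value equivalence only: Python A pops every checked word from `words`, B does not mutate it).


-- ===== PORT A =====
-- literal transliteration: words.pop() takes the LAST element (getLast) leaving dropLast;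
-- content.lower() is recomputed at each recursive call, as in the Python.
def search_recursive (words : List String) (content : String) : Bool :=
  if h : words.length > 0 then
    let search_word := PySem.Str.lower (PySem.Str.strip (words.getLast (by
      intro hnil; simp [hnil] at h)))
    let rest := words.dropLast
    if PySem.Str.len search_word > 0 && PySem.Str.isIn search_word (PySem.Str.lower content) then
      if rest.length > 0 then search_recursive rest content else true
    else false
  else false
termination_by words.length
decreasing_by simp; omega

-- ===== PORT B =====
-- content lowered once; one all() pass over words, front to back.
def search_recursive_alt (words : List String) (content : String) : Bool :=
  let c := PySem.Str.lower content
  (words.length > 0 : Bool) &&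
    words.all (fun w =>
      let w2 := PySem.Str.lower (PySem.Str.strip w)
      (PySem.Str.len w2 > 0 : Bool) && PySem.Str.isIn w2 c)

-- ===== PRECONDITION & SPEC =====
def Spec_search_recursive (words : List String) (content : String) (out : Bool) : Prop := out = search_recursive_alt words content
instance (words : List String) (content : String) (out : Bool) : Decidable (Spec_search_recursive words content out) := by unfold Spec_search_recursive; infer_instance

-- ===== CLAIM (what is proved, stated in full; the proofs are below) =====
def Claim_equal_search_recursive : Prop := ∀ (words : List String) (content : String), Dom_search_recursive words content → Spec_search_recursive words content (search_recursive words content)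

-- ===== LEMMAS AND PROOFS =====

theorem search_recursive_eq_all (words : List String) (content : String) :
    search_recursive words content =
      ((words.length > 0 : Bool) &&
        words.all (fun w =>
          let w2 := PySem.Str.lower (PySem.Str.strip w)
          (PySem.Str.len w2 > 0 : Bool) && PySem.Str.isIn w2 (PySem.Str.lower content))) := by
  induction words using List.reverseRecOn with
  | nil => simp [search_recursive]
  | append_singleton xs x ih =>
    rw [search_recursive, dif_pos (by simp)]
    simp only [List.getLast_append_singleton, List.dropLast_concat, List.all_append,
      List.all_cons, List.all_nil]
    cases hx : (decide (PySem.Str.len (PySem.Str.lower (PySem.Str.strip x)) > 0) &&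
        PySem.Str.isIn (PySem.Str.lower (PySem.Str.strip x)) (PySem.Str.lower content)) with
    | false => simp
    | true =>
      simp only [if_true]
      rcases xs with _ | ⟨y, ys⟩
      · simp
      · rw [if_pos (by simp), ih]
        simp

-- ===== VERDICT (by name: the statement is the Claim_ definition above) =====
theorem search_recursive_spec : Claim_equal_search_recursive := by
  intro words content _
  unfold Spec_search_recursive search_recursive_alt
  exact search_recursive_eq_all words content
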